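-- pv_equiv track=rewrite | github.com/dkiswanto/machine-learning-exercise | mlp-neural-network/util.py | separate_data_by_class
-- ===== SOURCE A (Python) =====
-- def separate_data_by_class(data_set):
--     """
--     :param data_set: (data, labels)
--     :return: set(separated_data:dict = {'label': ([x],[y])}
--     """
--     separated_data = {}
--     total_class = 0
--     data, labels = data_set
--     for d, label in zip(data, labels):
--         if separated_data.get(label) is None:
--             separated_data[label] = ([d[0]], [d[1]])
--             total_class += 1
--         else:
--             separated_data[label][0].append(d[0])
--             separated_data[label][1].append(d[1])
--
--     return separated_data, total_class
-- ===== SOURCE B (Python) =====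
-- def separate_data_by_class(data_set):
--     data, labels = data_set
--     # phase 1: group whole points by label, preserving first-appearance order
--     groups = {}
--     for d, label in zip(data, labels):
--         groups.setdefault(label, []).append(d)
--     # phase 2: transpose each group's points into ([x],[y])
--     separated_data = {label: ([p[0] for p in pts], [p[1] for p in pts])
--                       for label, pts in groups.items()}
--     return separated_data, len(separated_data)
-- ===== Notes on version B (the rewrite author's own statement) =====
-- stated objective: alternative
-- what changed: Replaces A's single incremental loop (which builds the ([x],[y]) pairs and counts classes as it goes) by a group phase (label -> list of whole points via setdefault) followed by a transpose phase, with the class count read off as the dict's length.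
import Mathlib
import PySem

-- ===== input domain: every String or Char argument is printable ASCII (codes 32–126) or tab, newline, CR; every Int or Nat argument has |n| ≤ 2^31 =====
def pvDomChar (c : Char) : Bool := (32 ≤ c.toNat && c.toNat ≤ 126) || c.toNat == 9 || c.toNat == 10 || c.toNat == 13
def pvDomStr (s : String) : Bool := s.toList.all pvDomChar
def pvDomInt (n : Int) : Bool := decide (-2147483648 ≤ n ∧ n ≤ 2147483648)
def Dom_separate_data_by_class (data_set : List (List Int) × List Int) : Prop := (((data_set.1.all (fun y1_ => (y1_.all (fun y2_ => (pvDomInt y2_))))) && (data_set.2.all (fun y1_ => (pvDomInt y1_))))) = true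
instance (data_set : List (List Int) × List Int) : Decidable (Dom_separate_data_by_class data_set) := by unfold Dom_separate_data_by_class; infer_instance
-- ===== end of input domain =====

-- B regroups A's single incremental loop into a group-by-label phase plus a transpose phase; same return value.

-- ===== PORT A =====
-- A's loop body: on an unseen label start ([d[0]],[d[1]]) and bump the counter,
-- otherwise append d[0], d[1] to the label's pair of lists. (d[0]/d[1] as pyGetD:
-- Pre_ guarantees every zipped point has length ≥ 2, exactly where Python returns.)
def pvStepA (st : PySem.Dict Int (List Int × List Int) × Int) (dl : List Int × Int) :
    PySem.Dict Int (List Int × List Int) × Int :=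
  match st.1.get? dl.2 with
  | none => (st.1.insert dl.2 ([PySem.List.pyGetD dl.1 0 0], [PySem.List.pyGetD dl.1 1 0]), st.2 + 1)
  | some xy => (st.1.insert dl.2 (xy.1 ++ [PySem.List.pyGetD dl.1 0 0], xy.2 ++ [PySem.List.pyGetD dl.1 1 0]), st.2)

def separate_data_by_class (data_set : List (List Int) × List Int) : (List (Int × List Int × List Int)) × Int :=
  let st := (List.zip data_set.1 data_set.2).foldl pvStepA (PySem.Dict.empty, 0)
  (st.1.items, st.2)

-- ===== PORT B =====
-- B's grouping step: groups.setdefault(label, []).append(d)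
def pvStepB (g : PySem.Dict Int (List (List Int))) (dl : List Int × Int) :
    PySem.Dict Int (List (List Int)) :=
  g.modify dl.2 [] (· ++ [dl.1])

def separate_data_by_class_alt (data_set : List (List Int) × List Int) : (List (Int × List Int × List Int)) × Int :=
  let groups := (List.zip data_set.1 data_set.2).foldl pvStepB PySem.Dict.empty
  let sep := groups.items.map (fun p =>
    (p.1, p.2.map (fun q => PySem.List.pyGetD q 0 0), p.2.map (fun q => PySem.List.pyGetD q 1 0)))
  (sep, (sep.length : Int))

-- ===== PRECONDITION & SPEC =====
-- Pre_ excludes exactly the inputs where Python A raises IndexError: a zipped data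
-- point with fewer than 2 coordinates (B raises there too).
def Pre_separate_data_by_class (data_set : List (List Int) × List Int) : Prop :=
  ∀ d ∈ data_set.1.take data_set.2.length, 2 ≤ d.length
instance (data_set : List (List Int) × List Int) : Decidable (Pre_separate_data_by_class data_set) := by unfold Pre_separate_data_by_class; infer_instance

def pvWitness_separate_data_by_class : (List (List Int) × List Int) := ([[1, 2], [3, 4], [5, 6]], [0, 1, 0])

def Spec_separate_data_by_class (data_set : List (List Int) × List Int) (out : (List (Int × List Int × List Int)) × Int) : Prop := out = separate_data_by_class_alt data_set
instance (data_set : List (List Int) × List Int) (out : (List (Int × List Int × List Int)) × Int) : Decidable (Spec_separate_data_by_class data_set out) := by unfold Spec_separate_data_by_class; infer_instance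

-- ===== CLAIM (what is proved, stated in full; the proofs are below) =====
def Claim_equal_separate_data_by_class : Prop := ∀ (data_set : List (List Int) × List Int), Dom_separate_data_by_class data_set → Pre_separate_data_by_class data_set → Spec_separate_data_by_class data_set (separate_data_by_class data_set)

-- ===== LEMMAS AND PROOFS =====

-- the transposition applied entry-wise to B's groups
def pvF (p : Int × List (List Int)) : Int × List Int × List Int :=
  (p.1, p.2.map (fun q => PySem.List.pyGetD q 0 0), p.2.map (fun q => PySem.List.pyGetD q 1 0))

lemma pvGet?_rel (dB : PySem.Dict Int (List (List Int))) (k : Int) :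
    (PySem.Dict.mk (dB.items.map pvF) : PySem.Dict Int (List Int × List Int)).get? k
      = (dB.get? k).map (fun pts => (pts.map (fun q => PySem.List.pyGetD q 0 0),
                                     pts.map (fun q => PySem.List.pyGetD q 1 0))) := by
  simp only [PySem.Dict.get?, List.find?_map]
  cases h : dB.items.find? (fun p => p.1 == k) with
  | none =>
    have : dB.items.find? ((fun p => p.1 == k) ∘ pvF) = none := by
      simpa [Function.comp, pvF] using h
    simp [this]
  | some p =>
    have : dB.items.find? ((fun p => p.1 == k) ∘ pvF) = some p := by
      simpa [Function.comp, pvF] using h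
    simp [this, pvF]

lemma pvContains_rel (dB : PySem.Dict Int (List (List Int))) (k : Int) :
    (PySem.Dict.mk (dB.items.map pvF) : PySem.Dict Int (List Int × List Int)).contains k
      = dB.contains k := by
  rw [PySem.Dict.contains_eq_isSome_get?, PySem.Dict.contains_eq_isSome_get?, pvGet?_rel]
  cases dB.get? k <;> rfl

-- the loop invariant: A's state is B's state transposed entry-wise, and A's counter is the size
lemma pvLoop_inv (l : List (List Int × Int)) :
    ∀ (dA : PySem.Dict Int (List Int × List Int)) (dB : PySem.Dict Int (List (List Int))) (t : Int),
      dA.items = dB.items.map pvF → t = (dA.items.length : Int) →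
      (l.foldl pvStepA (dA, t)).1.items = (l.foldl pvStepB dB).items.map pvF ∧
      (l.foldl pvStepA (dA, t)).2 = ((l.foldl pvStepA (dA, t)).1.items.length : Int) := by
  induction l with
  | nil => intro dA dB t h ht; exact ⟨h, ht⟩
  | cons dl l ih =>
    intro dA dB t h ht
    have hdA : dA = PySem.Dict.mk (dB.items.map pvF) := by
      cases dA; simpa using h
    subst hdA
    simp only [List.foldl_cons]
    cases hg : dB.get? dl.2 with
    | none =>
      have hcB : dB.contains dl.2 = false := by
        rw [PySem.Dict.contains_eq_isSome_get?, hg]; rfl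
      have hcA : (PySem.Dict.mk (dB.items.map pvF) : PySem.Dict Int (List Int × List Int)).get? dl.2 = none := by
        rw [pvGet?_rel, hg]; rfl
      apply ih
      · simp only [hcA, pvStepB, PySem.Dict.modify,
          PySem.Dict.getD_of_not_contains _ _ hcB]
        rw [PySem.Dict.items_insert_of_not_contains _ _ (by rw [pvContains_rel]; exact hcB),
          PySem.Dict.items_insert_of_not_contains _ _ hcB]
        simp [pvF]
      · simp only [hcA]
        rw [PySem.Dict.items_insert_of_not_contains _ _ (by rw [pvContains_rel]; exact hcB)]
        simp [ht]
    | some pts =>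
      have hcB : dB.contains dl.2 = true := by
        rw [PySem.Dict.contains_eq_isSome_get?, hg]; rfl
      have hcA : (PySem.Dict.mk (dB.items.map pvF) : PySem.Dict Int (List Int × List Int)).get? dl.2
          = some (pts.map (fun q => PySem.List.pyGetD q 0 0), pts.map (fun q => PySem.List.pyGetD q 1 0)) := by
        rw [pvGet?_rel, hg]; rfl
      have hgD : dB.getD dl.2 [] = pts := PySem.Dict.getD_of_get?_eq_some _ _ hg
      apply ih
      · simp only [hcA, pvStepB, PySem.Dict.modify, hgD]
        rw [PySem.Dict.items_insert_of_contains _ _ (by rw [pvContains_rel]; exact hcB),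
          PySem.Dict.items_insert_of_contains _ _ hcB]
        simp only [List.map_map]
        apply List.map_congr_left
        intro p _
        by_cases hk : p.1 = dl.2 <;> simp [Function.comp, pvF, hk]
      · simp only [hcA]
        rw [PySem.Dict.items_insert_of_contains _ _ (by rw [pvContains_rel]; exact hcB)]
        simp [ht]

-- ===== VERDICT (by name: the statement is the Claim_ definition above) =====
theorem separate_data_by_class_spec : Claim_equal_separate_data_by_class := by
  intro data_set _ _
  unfold Spec_separate_data_by_class separate_data_by_class separate_data_by_class_alt
  have h := pvLoop_inv (List.zip data_set.1 data_set.2) PySem.Dict.empty PySem.Dict.empty 0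
    (by rfl) (by rfl)
  simp only []
  exact Prod.ext h.1 (h.2.trans (by rw [h.1]; simp))
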